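-- pv_equiv track=rewrite | github.com/hanbyeolkang/DE7 | 00_코딩테스트/봉인된 주문.py | solution
-- ===== SOURCE A (Python) =====
-- def solution(n, bans):
--     # a -> 1, b -> 2 ... aa -> 27, ab -> 28
--     def str_to_num(s):
--         num = 0
--         for i, char in enumerate(reversed(s)):
--             num += (ord(char) - ord('a') + 1) * (26 ** i)
--         return num
--
--     # 1 -> a, 2 -> b ... 27 -> aa, 28 -> ab
--     def num_to_str(num):
--         res = []
--         while num > 0:
--             num, rem = divmod(num - 1, 26)
--             res.append(chr(ord('a') + rem))
--         return "".join(reversed(res))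
--
--     # 삭제할 주문들을 숫자로 바꿔서 정렬
--     ban_nums = sorted([str_to_num(b) for b in bans])
--
--     # 삭제된 주문 만큼 n값 보정해주기
--     for b in ban_nums:
--         if b <= n:
--             n += 1
--         else:
--             break
--
--     return num_to_str(n)
-- ===== SOURCE B (Python) =====
-- def solution(n, bans):
--     # a -> 1, b -> 2 ... aa -> 27, ab -> 28
--     def str_to_num(s):
--         num = 0
--         for i, char in enumerate(reversed(s)):
--             num += (ord(char) - ord('a') + 1) * (26 ** i)
--         return num
--
--     # 1 -> a, 2 -> b ... 27 -> aa, 28 -> ab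
--     def num_to_str(num):
--         res = []
--         while num > 0:
--             num, rem = divmod(num - 1, 26)
--             res.append(chr(ord('a') + rem))
--         return "".join(reversed(res))
--
--     nums = [str_to_num(b) for b in bans]
--     # fixpoint iteration: the answer is the least v >= n with v == n + #{bans <= v}
--     v = n
--     while True:
--         c = sum(1 for x in nums if x <= v)
--         if v < n + c:
--             v = n + c
--         else:
--             return num_to_str(v)
-- ===== Notes on version B (the rewrite author's own statement) =====
-- stated objective: alternative
-- what changed: Replaces A's sort of the ban numbers plus the sequential 'bump n while ban <= n' pass by a fixpoint iteration on the answer value itself: repeat v <- n + count(bans <= v) starting at v = n until it stabilises (no sorting at all), then convert with the unchanged num_to_str.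
import Mathlib
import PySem

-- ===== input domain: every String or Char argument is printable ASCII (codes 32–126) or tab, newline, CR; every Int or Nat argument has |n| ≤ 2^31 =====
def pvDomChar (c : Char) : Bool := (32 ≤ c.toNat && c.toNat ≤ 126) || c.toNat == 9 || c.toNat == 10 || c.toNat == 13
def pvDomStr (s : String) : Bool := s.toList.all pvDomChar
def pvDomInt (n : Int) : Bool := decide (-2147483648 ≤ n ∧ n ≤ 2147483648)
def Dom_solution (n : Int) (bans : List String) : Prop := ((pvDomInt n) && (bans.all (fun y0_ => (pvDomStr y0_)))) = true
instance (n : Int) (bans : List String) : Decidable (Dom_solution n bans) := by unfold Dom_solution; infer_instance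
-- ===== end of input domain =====

-- B replaces A's pass over the sorted ban list by a fixpoint iteration on the answer value
-- (v ← n + #{bans ≤ v}, no sorting); same return value everywhere (objective: alternative).

-- ===== PORT A =====
-- shared helper: str_to_num (identical code in Source A and Source B)
def strToNum (s : String) : Int :=
  (PySem.List.enumerate s.toList.reverse 0).foldl
    (fun num p => num + ((p.2.toNat : Int) - 97 + 1) * (26 : Int) ^ p.1.toNat) 0

-- shared helper: num_to_str's while-loop (identical code in Source A and Source B)
def numToStrLoop (num : Int) (res : List Char) : List Char :=
  if 0 < num then
    numToStrLoop (PySem.Int.floordiv (num - 1) 26)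
      (res ++ [Char.ofNat ((97 + PySem.Int.mod (num - 1) 26).toNat)])
  else res
termination_by num.toNat
decreasing_by
  rename_i h
  rw [PySem.Int.floordiv_eq_ediv_of_pos (by omega : (0:Int) < 26)]
  have h1 : (num - 1) / 26 ≤ num - 1 := Int.ediv_le_self _ (by omega)
  have h2 : 0 ≤ (num - 1) / 26 := Int.ediv_nonneg (by omega) (by omega)
  omega

-- "".join(reversed(res)) : exact, a join of single-char strings is the char list
def numToStr (num : Int) : String := String.ofList (numToStrLoop num []).reverse

-- A's 'for b in ban_nums: if b <= n: n += 1 else: break'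
def bumpA (n : Int) (bs : List Int) : Int :=
  match bs with
  | [] => n
  | b :: rest => if b ≤ n then bumpA (n + 1) rest else n

def solution (n : Int) (bans : List String) : String :=
  numToStr (bumpA n (PySem.List.sorted (bans.map strToNum) (fun x => x) false))

-- ===== PORT B =====
-- Source B's 'while True: c = sum(1 for x in nums if x <= v); if v < n + c: v = n + c else: return'
def fixLoop (n : Int) (nums : List Int) (v : Int) : Int :=
  if v < n + (nums.countP (fun x => decide (x ≤ v)) : Int) then
    fixLoop n nums (n + (nums.countP (fun x => decide (x ≤ v)) : Int))
  else v
termination_by (n + nums.length - v).toNat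
decreasing_by
  rename_i h
  have hc : nums.countP (fun x => decide (x ≤ v)) ≤ nums.length := List.countP_le_length
  omega

def solution_alt (n : Int) (bans : List String) : String :=
  numToStr (fixLoop n (bans.map strToNum) n)

-- ===== PRECONDITION & SPEC =====
def Spec_solution (n : Int) (bans : List String) (out : String) : Prop := out = solution_alt n bans
instance (n : Int) (bans : List String) (out : String) : Decidable (Spec_solution n bans out) := by unfold Spec_solution; infer_instance

-- ===== CLAIM (what is proved, stated in full; the proofs are below) =====
def Claim_equal_solution : Prop := ∀ (n : Int) (bans : List String), Dom_solution n bans → Spec_solution n bans (solution n bans)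

-- ===== LEMMAS AND PROOFS =====

-- Characterisation of A's loop on a sorted list s: r = bumpA n s satisfies
-- n ≤ r ≤ n + |s|, #{b ∈ s | b ≤ r} = r - n, and below r the count is too big.
theorem bumpA_char (s : List Int) : ∀ n : Int, s.Pairwise (· ≤ ·) →
    n ≤ bumpA n s ∧ bumpA n s ≤ n + s.length ∧
    (s.countP (fun x => decide (x ≤ bumpA n s)) : Int) = bumpA n s - n ∧
    ∀ v, n ≤ v → v < bumpA n s → v - n < (s.countP (fun x => decide (x ≤ v)) : Int) := by
  induction s with
  | nil => intro n _; simp [bumpA]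
  | cons b rest ih =>
    intro n hsort
    have hb : ∀ x ∈ rest, b ≤ x := (List.pairwise_cons.mp hsort).1
    have hrest : rest.Pairwise (· ≤ ·) := hsort.of_cons
    by_cases hbn : b ≤ n
    · have hstep : bumpA n (b :: rest) = bumpA (n + 1) rest := by simp [bumpA, hbn]
      obtain ⟨h1, h2, h3, h4⟩ := ih (n + 1) hrest
      refine ⟨by omega, by simp [hstep]; omega, ?_, ?_⟩
      · rw [hstep, List.countP_cons]
        have : b ≤ bumpA (n + 1) rest := by omega
        simp [this]
        omega
      · intro v hnv hvr
        rw [hstep] at hvr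
        rw [List.countP_cons]
        have hbv : b ≤ v := by omega
        simp [hbv]
        rcases lt_or_ge v (n + 1) with h | h
        · have : v = n := by omega
          have : (0:Int) ≤ (rest.countP (fun x => decide (x ≤ v)) : Int) := by positivity
          omega
        · have := h4 v h hvr
          omega
    · have hstep : bumpA n (b :: rest) = n := by simp [bumpA, hbn]
      refine ⟨by omega, by simp [hstep]; omega, ?_, ?_⟩
      · rw [hstep, List.countP_cons]
        have hz : rest.countP (fun x => decide (x ≤ n)) = 0 := by
          rw [List.countP_eq_zero]
          intro a ha
          have := hb a ha
          simp only [decide_eq_true_eq]; omega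
        simp [hz, hbn]
      · intro v hnv hvr
        rw [hstep] at hvr
        omega

-- B's fixpoint loop, started anywhere in [n, r], reaches r
theorem fixLoop_reaches (n : Int) (nums : List Int) (r : Int)
    (hfix : (nums.countP (fun x => decide (x ≤ r)) : Int) = r - n)
    (hbelow : ∀ v, n ≤ v → v < r → v - n < (nums.countP (fun x => decide (x ≤ v)) : Int)) :
    ∀ (k : Nat) (v : Int), (r - v).toNat ≤ k → n ≤ v → v ≤ r → fixLoop n nums v = r := by
  intro k
  induction k with
  | zero =>
    intro v hk hnv hvr
    have hvr' : v = r := by omega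
    subst hvr'
    rw [fixLoop]
    simp [hfix]
  | succ k ihk =>
    intro v hk hnv hvr
    rw [fixLoop]
    by_cases h : v < n + (nums.countP (fun x => decide (x ≤ v)) : Int)
    · simp only [h, if_true]
      have hmono : nums.countP (fun x => decide (x ≤ v)) ≤ nums.countP (fun x => decide (x ≤ r)) := by
        apply List.countP_mono_left
        intro a _ ha
        simp at ha ⊢; omega
      have hle : (nums.countP (fun x => decide (x ≤ v)) : Int) ≤ r - n := by
        rw [← hfix]; exact_mod_cast hmono
      have hpos : (0:Int) ≤ (nums.countP (fun x => decide (x ≤ v)) : Int) := by positivity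
      exact ihk _ (by omega) (by omega) (by omega)
    · simp only [h, if_false]
      by_contra hne
      have hvlt : v < r := lt_of_le_of_ne hvr (by intro hh; exact hne (by rw [hh]))
      have := hbelow v hnv hvlt
      omega

-- main bridge: A's bump over the sorted list equals B's fixpoint iteration
theorem bump_eq_fixLoop (n : Int) (nums : List Int) :
    bumpA n (PySem.List.sorted nums (fun x => x) false) = fixLoop n nums n := by
  set s := PySem.List.sorted nums (fun x => x) false with hs
  have hperm : s.Perm nums := PySem.List.sorted_perm nums (fun x => x) false
  have hsort : s.Pairwise (· ≤ ·) := PySem.List.sorted_pairwise nums (fun x => x)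
  obtain ⟨h1, h2, h3, h4⟩ := bumpA_char s n hsort
  have hcnt : ∀ v : Int, s.countP (fun x => decide (x ≤ v)) = nums.countP (fun x => decide (x ≤ v)) :=
    fun v => hperm.countP_congr (fun x _ => rfl)
  symm
  exact fixLoop_reaches n nums (bumpA n s)
    (by rw [← hcnt]; exact h3)
    (fun v hv hvr => by rw [← hcnt]; exact h4 v hv hvr)
    (bumpA n s - n).toNat n (le_refl _) (le_refl _) h1

-- ===== VERDICT (by name: the statement is the Claim_ definition above) =====
theorem solution_spec : Claim_equal_solution := by
  intro n bans _
  unfold Spec_solution solution solution_alt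
  rw [bump_eq_fixLoop]
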